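-- pv_equiv track=rewrite | github.com/catowabisabi/meow-code | api_server/services/sandbox/path_validation.py | filter_out_flags
-- ===== SOURCE A (Python) =====
-- def filter_out_flags(args: list) -> list:
--     """
--     Filter out flag arguments, correctly handling -- end-of-options.
--
--     SECURITY: Must handle POSIX `--` delimiter to catch paths like `-/../foo`.
--     """
--     result = []
--     after_double_dash = False
--
--     for arg in args:
--         if after_double_dash:
--             result.append(arg)
--         elif arg == "--":
--             after_double_dash = True
--         elif not arg.startswith("-"):
--             result.append(arg)
--
--     return result
-- ===== SOURCE B (Python) =====
-- def filter_out_flags(args: list) -> list: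
--     """Locate-split re-implementation: filter before first "--", keep suffix verbatim."""
--     if "--" not in args:
--         return [a for a in args if not a.startswith("-")]
--     i = args.index("--")
--     return [a for a in args[:i] if not a.startswith("-")] + args[i + 1:]
-- ===== Notes on version B (the rewrite author's own statement) =====
-- stated objective: alternative
-- what changed: Replaced the single-pass boolean flag state machine with a locate-split structure: find the first "--" with index, filter only the prefix, and append the suffix unchanged.
import Mathlib
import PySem

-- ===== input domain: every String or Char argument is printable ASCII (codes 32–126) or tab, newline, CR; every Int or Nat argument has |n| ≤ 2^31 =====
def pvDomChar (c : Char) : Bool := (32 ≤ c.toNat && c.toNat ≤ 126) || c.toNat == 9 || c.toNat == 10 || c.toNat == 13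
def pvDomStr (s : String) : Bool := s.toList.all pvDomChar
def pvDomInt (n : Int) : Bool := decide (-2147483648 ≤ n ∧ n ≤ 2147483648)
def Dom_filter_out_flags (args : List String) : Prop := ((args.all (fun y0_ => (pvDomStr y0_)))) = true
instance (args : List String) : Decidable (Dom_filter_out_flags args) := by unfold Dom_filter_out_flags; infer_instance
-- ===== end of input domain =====

-- B replaces A's single-pass boolean state machine by locate-first-"--", filter the prefix, append the suffix verbatim (objective: alternative decomposition).


-- ===== PORT A =====
-- the loop body of A: state = (result, after_double_dash)
def pvStepA (s : List String × Bool) (arg : String) : List String × Bool :=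
  if s.2 then (s.1 ++ [arg], s.2)
  else if arg == "--" then (s.1, true)
  else if !(PySem.Str.startswith arg "-") then (s.1 ++ [arg], s.2)
  else s

def filter_out_flags (args : List String) : List String :=
  (args.foldl pvStepA ([], false)).1

-- ===== PORT B =====
def filter_out_flags_alt (args : List String) : List String :=
  if !(args.contains "--") then
    args.filter (fun a => !(PySem.Str.startswith a "-"))
  else
    match PySem.List.index? args "--" with
    | some i =>
        (PySem.List.slice args none (some (i : Int))).filter
          (fun a => !(PySem.Str.startswith a "-"))
        ++ PySem.List.slice args (some ((i : Int) + 1)) none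
    | none => []  -- unreachable: "--" ∈ args

-- ===== PRECONDITION & SPEC =====
def Spec_filter_out_flags (args : List String) (out : List String) : Prop := out = filter_out_flags_alt args
instance (args : List String) (out : List String) : Decidable (Spec_filter_out_flags args out) := by unfold Spec_filter_out_flags; infer_instance

-- ===== CLAIM (what is proved, stated in full; the proofs are below) =====
def Claim_equal_filter_out_flags : Prop := ∀ (args : List String), Dom_filter_out_flags args → Spec_filter_out_flags args (filter_out_flags args)

-- ===== LEMMAS AND PROOFS =====

-- common reference function: filter until first "--", then keep the rest
def pvGo : List String → List String
  | [] => []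
  | a :: rest =>
      if a = "--" then rest
      else if PySem.Str.startswith a "-" then pvGo rest
      else a :: pvGo rest

theorem pvFoldA_true (l acc : List String) :
    l.foldl pvStepA (acc, true) = (acc ++ l, true) := by
  induction l generalizing acc with
  | nil => simp
  | cons a t ih => simp [pvStepA, ih]

theorem pvFoldA_false (l acc : List String) :
    (l.foldl pvStepA (acc, false)).1 = acc ++ pvGo l := by
  induction l generalizing acc with
  | nil => simp [pvGo]
  | cons a t ih =>
    by_cases h : a = "--"
    · simp [pvStepA, pvGo, h, pvFoldA_true]
    · by_cases hs : PySem.Chars.startswith a.toList ['-'] = true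
      · simp [pvStepA, pvGo, h, hs, ih]
      · simp [pvStepA, pvGo, h, hs, ih]

theorem pvA_eq_go (args : List String) : filter_out_flags args = pvGo args := by
  simpa using pvFoldA_false args []

theorem pvB_eq_go (args : List String) : filter_out_flags_alt args = pvGo args := by
  induction args with
  | nil => simp [filter_out_flags_alt, pvGo]
  | cons a t ih =>
    by_cases h : a = "--"
    · subst h
      have h0 : PySem.List.index? ("--" :: t) "--" = some 0 :=
        PySem.List.index?_cons_self _ _
      rw [pvGo, if_pos rfl]
      simp only [filter_out_flags_alt, h0]
      have hc : (("--" :: t).contains "--") = true := by simp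
      rw [hc]
      simp [PySem.List.slice_to, PySem.List.slice_from]
    · have hne : a ≠ "--" := h
      by_cases hm : "--" ∈ t
      · obtain ⟨k, hk⟩ := Option.isSome_iff_exists.mp
          ((PySem.List.index?_isSome_iff (xs := t) (v := "--")).mpr hm)
        have hcons : PySem.List.index? (a :: t) "--" = some (k + 1) := by
          rw [PySem.List.index?_cons_of_ne t hne, hk]; rfl
        have hc : ((a :: t).contains "--") = true := by simp [hm]
        have hct : (t.contains "--") = true := by simp [hm]
        have hslice1 : PySem.List.slice (a :: t) none (some ((k + 1 : Nat) : Int))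
            = a :: PySem.List.slice t none (some (k : Int)) := by
          rw [PySem.List.slice_to_natCast, PySem.List.slice_to_natCast]
          simp
        have hslice2 : PySem.List.slice (a :: t) (some (((k + 1 : Nat) : Int) + 1)) none
            = PySem.List.slice t (some ((k : Int) + 1)) none := by
          have h1 : ((k + 1 : Nat) : Int) + 1 = ((k + 2 : Nat) : Int) := by push_cast; ring
          have h2 : (k : Int) + 1 = ((k + 1 : Nat) : Int) := by push_cast; ring
          rw [h1, h2, PySem.List.slice_from_natCast, PySem.List.slice_from_natCast]
          rfl
        rw [pvGo, if_neg h]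
        simp only [filter_out_flags_alt, hc, hcons, hct, hk, Bool.not_true,
          Bool.false_eq_true, if_false] at ih ⊢
        rw [hslice1, hslice2]
        simp only [List.filter_cons]
        by_cases hs : PySem.Chars.startswith a.toList ['-'] = true
        · simpa [hs] using ih
        · simpa [hs] using ih
      · have hc : ((a :: t).contains "--") = false := by
          simp [hm]; exact fun hcontra => hne hcontra.symm
        have hct : (t.contains "--") = false := by simp [hm]
        simp only [filter_out_flags_alt, hct] at ih
        rw [pvGo, if_neg h]
        simp only [filter_out_flags_alt, hc, Bool.not_false, if_true] at ih ⊢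
        simp only [List.filter_cons]
        simp only [pysem] at ih
        rw [show "-".toList = ['-'] from rfl] at ih
        by_cases hs : PySem.Chars.startswith a.toList ['-'] = true
        · simp [hs, ih]
        · simp [hs, ih]

-- ===== VERDICT (by name: the statement is the Claim_ definition above) =====
theorem filter_out_flags_spec : Claim_equal_filter_out_flags := by
  intro args _
  unfold Spec_filter_out_flags
  rw [pvA_eq_go, pvB_eq_go]
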